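-- pv_equiv track=rewrite | github.com/ULTRAPROJECT-BUILD/ULTRAPROJECT | scripts/extract_tokens_from_web_ui.py | choose_spacing_base
-- ===== SOURCE A (Python) =====
-- def choose_spacing_base(values: list[int]) -> int:
--     positives = [value for value in values if value > 0]
--     if not positives:
--         return 4
--     scores = {base: sum(1 for value in positives if value % base == 0) for base in (4, 6, 8, 2)}
--     if scores[4] >= 3:
--         return 4
--     return max(scores, key=lambda base: (scores[base], -base))
-- ===== SOURCE B (Python) =====
-- def choose_spacing_base(values: list[int]) -> int:
--     # Counting-sort style: divisibility by 2/4/6/8 depends only on v % 24 (each base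
--     # divides 24), so bucket the positives into 24 residue classes in one pass and
--     # score each base from the 24 buckets instead of rescanning the values.
--     hist = [0] * 24
--     n = 0
--     for v in values:
--         if v > 0:
--             n += 1
--             hist[v % 24] += 1
--     if n == 0:
--         return 4
--
--     def score(base):
--         return sum(hist[r] for r in range(0, 24, base))
--
--     if score(4) >= 3:
--         return 4
--     return -max((score(b), -b) for b in (2, 4, 6, 8))[1]
-- ===== Notes on version B (the rewrite author's own statement) =====
-- stated objective: alternative
-- what changed: B replaces A's rebuilt positives list plus four sum-scans and dict+max(key) selection by a counting-sort-style 24-bucket residue histogram (valid since 2, 4, 6 and 8 all divide 24): one pass buckets positives by v % 24, base scores are then read off the 24 buckets, and the winner is the tuple-max of (score, -base).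
import Mathlib
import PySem

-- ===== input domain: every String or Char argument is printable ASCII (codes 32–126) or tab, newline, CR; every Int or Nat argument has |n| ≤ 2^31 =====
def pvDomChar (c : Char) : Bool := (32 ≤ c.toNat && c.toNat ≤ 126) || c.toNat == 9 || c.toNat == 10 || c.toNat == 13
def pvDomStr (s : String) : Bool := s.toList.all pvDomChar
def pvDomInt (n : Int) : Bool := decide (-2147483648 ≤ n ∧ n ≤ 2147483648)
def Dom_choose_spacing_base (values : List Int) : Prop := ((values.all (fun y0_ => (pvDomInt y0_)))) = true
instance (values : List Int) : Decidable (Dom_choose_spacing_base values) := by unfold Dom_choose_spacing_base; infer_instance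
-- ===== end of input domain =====

-- B: a counting-sort-style 24-bucket residue histogram (2, 4, 6, 8 all divide 24) scored from the
-- buckets with a tuple-max selection, instead of A's positives list, four sum-scans and dict+max(key).


-- ===== PORT A =====
-- literal port of A: filter the positives, build the score dict over (4, 6, 8, 2)
-- (sum(1 for … if cond) is countP), then scores[4] >= 3 check and max(scores, key=…).
def choose_spacing_base (values : List Int) : Int :=
  let positives := values.filter (fun v => decide (0 < v))
  if positives.isEmpty then 4
  else
    let scores : PySem.Dict Int Int :=
      ([4, 6, 8, 2] : List Int).foldl
        (fun d b => PySem.Dict.insert d b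
          ((positives.countP (fun v => PySem.Int.mod v b == 0) : Nat) : Int)) PySem.Dict.empty
    if 3 ≤ PySem.Dict.getD scores 4 0 then 4
    else
      (PySem.List.max2? (PySem.Dict.keys scores)
        (fun b => PySem.Dict.getD scores b 0) (fun b => -b)).getD 0

-- ===== PORT B =====
-- one step of B's histogram pass: state (n, hist); hist[v % 24] += 1 is exact as set/getD
-- because 0 ≤ v % 24 < 24 = len(hist) (positive divisor), so the index never raises.
def histStep (s : Int × List Int) (v : Int) : Int × List Int :=
  if 0 < v then
    (s.1 + 1,
     s.2.set (PySem.Int.mod v 24).toNat (s.2.getD (PySem.Int.mod v 24).toNat 0 + 1))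
  else s

-- score(base) = sum(hist[r] for r in range(0, 24, base)); indices 0 ≤ r < 24 never raise
def scoreHist (hist : List Int) (base : Int) : Int :=
  (PySem.List.pyRange 0 24 base).foldl (fun acc r => acc + hist.getD r.toNat 0) 0

def choose_spacing_base_alt (values : List Int) : Int :=
  let s := values.foldl histStep (0, List.replicate 24 0)
  if s.1 = 0 then 4
  else if 3 ≤ scoreHist s.2 4 then 4
  else
    -- max of the four (score, -base) tuples: Python's lexicographic running max (strict replace)
    match ([2, 4, 6, 8] : List Int).map (fun b => (scoreHist s.2 b, -b)) with
    | [] => 0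
    | c :: t =>
      -(t.foldl (fun m p => if m.1 < p.1 ∨ (m.1 = p.1 ∧ m.2 < p.2) then p else m) c).2

-- ===== PRECONDITION & SPEC =====
def Spec_choose_spacing_base (values : List Int) (out : Int) : Prop := out = choose_spacing_base_alt values
instance (values : List Int) (out : Int) : Decidable (Spec_choose_spacing_base values out) := by unfold Spec_choose_spacing_base; infer_instance

-- ===== CLAIM (what is proved, stated in full; the proofs are below) =====
def Claim_equal_choose_spacing_base : Prop := ∀ (values : List Int), Dom_choose_spacing_base values → Spec_choose_spacing_base values (choose_spacing_base values)

-- ===== LEMMAS AND PROOFS =====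

-- count of positive values divisible by b (the quantity both programs compute per base)
def pvCnt (b : Int) (values : List Int) : Int :=
  (((values.filter (fun v => decide (0 < v))).countP (fun v => PySem.Int.mod v b == 0) : Nat) : Int)

theorem hist_fold_fst (values : List Int) (n : Int) (hist : List Int) :
    (values.foldl histStep (n, hist)).1 =
      n + ((values.filter (fun v => decide (0 < v))).length : Int) := by
  induction values generalizing n hist with
  | nil => simp
  | cons v t ih =>
    by_cases hv : 0 < v <;> simp [histStep, hv, ih] <;> ring

theorem getD_set_pos (hist : List Int) (i k : Nat) (x : Int) (h : i < hist.length) :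
    (hist.set i x).getD k 0 = if i = k then x else hist.getD k 0 := by
  simp [List.getD, List.getElem?_set]
  split_ifs <;> simp_all

set_option maxHeartbeats 2000000 in
theorem score_set (b : Int) (hb : b = 2 ∨ b = 4 ∨ b = 6 ∨ b = 8)
    (hist : List Int) (hlen : hist.length = 24) (m : Int) (hm0 : 0 ≤ m) (hm : m < 24) :
    scoreHist (hist.set m.toNat (hist.getD m.toNat 0 + 1)) b =
      scoreHist hist b + (if Int.emod m b = 0 then 1 else 0) := by
  have hr : m.toNat < hist.length := by omega
  have hset : ∀ k : Nat, (hist.set m.toNat (hist.getD m.toNat 0 + 1)).getD k 0 =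
      hist.getD k 0 + (if m.toNat = k then 1 else 0) := by
    intro k
    rw [getD_set_pos hist m.toNat k _ hr]
    split_ifs with h <;> simp_all
  rcases hb with rfl | rfl | rfl | rfl <;>
  · simp only [scoreHist,
      show PySem.List.pyRange 0 24 2 = [0,2,4,6,8,10,12,14,16,18,20,22] from by decide,
      show PySem.List.pyRange 0 24 4 = [0,4,8,12,16,20] from by decide,
      show PySem.List.pyRange 0 24 6 = [0,6,12,18] from by decide,
      show PySem.List.pyRange 0 24 8 = [0,8,16] from by decide,
      List.foldl, hset]
    interval_cases m <;> simp [Int.reduceToNat] <;> (try simp) <;> (try (first | decide | ring))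
    all_goals (rw [if_pos trivial]; ring)

theorem score_fold (b : Int) (hb : b = 2 ∨ b = 4 ∨ b = 6 ∨ b = 8)
    (values : List Int) (n : Int) (hist : List Int) (hlen : hist.length = 24) :
    scoreHist (values.foldl histStep (n, hist)).2 b = scoreHist hist b + pvCnt b values := by
  have hbpos : 0 < b := by rcases hb with rfl | rfl | rfl | rfl <;> norm_num
  have hbdvd : b ∣ 24 := by rcases hb with rfl | rfl | rfl | rfl <;> norm_num
  induction values generalizing n hist with
  | nil => simp [pvCnt]
  | cons v t ih =>
    by_cases hv : 0 < v
    · simp only [List.foldl_cons, histStep, if_pos hv]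
      rw [ih (n + 1) _ (by simp [hlen])]
      rw [score_set b hb hist hlen (PySem.Int.mod v 24)
        (PySem.Int.mod_nonneg v (by norm_num)) (PySem.Int.mod_lt v (by norm_num))]
      have hmm : Int.emod (PySem.Int.mod v 24) b = 0 ↔ (PySem.Int.mod v b == 0) = true := by
        rw [PySem.Int.mod_eq_emod_of_pos (a := v) (by norm_num : (0:Int) < 24), beq_iff_eq,
          PySem.Int.mod_eq_emod_of_pos (a := v) hbpos,
          show Int.emod (v % 24) b = v % 24 % b from rfl,
          Int.emod_emod_of_dvd v hbdvd]
      have hcnt : pvCnt b (v :: t) = (if Int.emod (PySem.Int.mod v 24) b = 0 then 1 else 0) + pvCnt b t := by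
        simp only [pvCnt, List.filter_cons, hv, decide_true, if_pos, List.countP_cons]
        by_cases hd : (PySem.Int.mod v b == 0) = true
        · rw [if_pos (hmm.mpr hd)]
          simp [hd]
          push_cast; ring
        · rw [if_neg (fun h => hd (hmm.mp h))]
          simp [hd]
      rw [hcnt]; ring
    · simp only [List.foldl_cons, histStep, if_neg hv]
      rw [ih n hist hlen]
      simp [pvCnt, hv]

theorem score_zero (b : Int) : scoreHist (List.replicate 24 0) b = 0 := by
  have hz : ∀ (l : List Int) (acc : Int),
      l.foldl (fun acc r => acc + (List.replicate 24 (0 : Int)).getD r.toNat 0) acc = acc := by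
    intro l
    induction l with
    | nil => intro acc; rfl
    | cons r t ih =>
      intro acc
      have : (List.replicate 24 (0 : Int)).getD r.toNat 0 = 0 := by
        simp only [List.getD, List.getElem?_replicate]
        split_ifs <;> simp
      simp only [List.foldl_cons, this, add_zero, ih]
  simpa [scoreHist] using hz (PySem.List.pyRange 0 24 b) 0

-- A's max over the score dict equals B's lexicographic tuple max, for any four scores
set_option maxHeartbeats 1000000 in
theorem sel_eq (s2 s4 s6 s8 : Int) :
    (PySem.List.max2? (PySem.Dict.keys
        ((((PySem.Dict.empty.insert 4 s4).insert 6 s6).insert 8 s8).insert 2 s2 : PySem.Dict Int Int))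
      (fun b => PySem.Dict.getD
        ((((PySem.Dict.empty.insert 4 s4).insert 6 s6).insert 8 s8).insert 2 s2 : PySem.Dict Int Int) b 0)
      (fun b => -b)).getD 0 =
    -((([((s4 : Int), (-4 : Int)), (s6, -6), (s8, -8)] : List (Int × Int)).foldl
        (fun m p => if m.1 < p.1 ∨ (m.1 = p.1 ∧ m.2 < p.2) then p else m) (s2, -2)).2) := by
  simp only [PySem.Dict.empty, PySem.Dict.insert, PySem.Dict.contains, PySem.Dict.keys,
    PySem.Dict.getD, PySem.Dict.get?, PySem.List.max2?, List.foldl_cons, List.foldl_nil,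
    List.map, List.any]
  norm_num
  split_ifs <;> simp_all <;> (try omega) <;> split_ifs <;> simp_all <;> (try omega) <;>
    split_ifs <;> simp_all <;> omega

theorem choose_eq (values : List Int) :
    choose_spacing_base values = choose_spacing_base_alt values := by
  unfold choose_spacing_base choose_spacing_base_alt
  have hlen : (List.replicate 24 (0 : Int)).length = 24 := by simp
  have hs4 := score_fold 4 (by norm_num) values 0 _ hlen
  have hs2 := score_fold 2 (by norm_num) values 0 _ hlen
  have hs6 := score_fold 6 (by norm_num) values 0 _ hlen
  have hs8 := score_fold 8 (by norm_num) values 0 _ hlen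
  rw [score_zero, zero_add] at hs4 hs2 hs6 hs8
  have hfst := hist_fold_fst values 0 (List.replicate 24 0)
  rw [zero_add] at hfst
  simp only [List.map_cons, List.map_nil, List.foldl_cons, List.foldl_nil, hs2, hs4, hs6, hs8, hfst]
  by_cases hp : (values.filter (fun v => decide (0 < v))).isEmpty = true
  · have h0 : ((values.filter (fun v => decide (0 < v))).length : Int) = 0 := by
      rw [List.isEmpty_iff] at hp
      simp [hp]
    rw [if_pos hp, if_pos h0]
  · rw [if_neg hp]
    have hne : ¬(((values.filter (fun v => decide (0 < v))).length : Int) = 0) := by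
      intro h
      exact hp (List.isEmpty_iff.mpr (List.length_eq_zero_iff.mp (by exact_mod_cast h)))
    rw [if_neg hne]
    have e2 : ((List.countP (fun v => PySem.Int.mod v 2 == 0)
        (values.filter (fun v => decide (0 < v))) : Nat) : Int) = pvCnt 2 values := rfl
    have e4 : ((List.countP (fun v => PySem.Int.mod v 4 == 0)
        (values.filter (fun v => decide (0 < v))) : Nat) : Int) = pvCnt 4 values := rfl
    have e6 : ((List.countP (fun v => PySem.Int.mod v 6 == 0)
        (values.filter (fun v => decide (0 < v))) : Nat) : Int) = pvCnt 6 values := rfl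
    have e8 : ((List.countP (fun v => PySem.Int.mod v 8 == 0)
        (values.filter (fun v => decide (0 < v))) : Nat) : Int) = pvCnt 8 values := rfl
    rw [e2, e4, e6, e8]
    have hg : PySem.Dict.getD
        ((((PySem.Dict.empty.insert 4 (pvCnt 4 values)).insert 6 (pvCnt 6 values)).insert 8
            (pvCnt 8 values)).insert 2 (pvCnt 2 values) : PySem.Dict Int Int) 4 0 = pvCnt 4 values := by
      simp [PySem.Dict.empty, PySem.Dict.insert, PySem.Dict.contains, PySem.Dict.getD,
        PySem.Dict.get?]
    rw [hg]
    by_cases h4 : 3 ≤ pvCnt 4 values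
    · rw [if_pos h4, if_pos h4]
    · rw [if_neg h4, if_neg h4]
      exact sel_eq (pvCnt 2 values) (pvCnt 4 values) (pvCnt 6 values) (pvCnt 8 values)

-- ===== VERDICT (by name: the statement is the Claim_ definition above) =====
theorem choose_spacing_base_spec : Claim_equal_choose_spacing_base := by
  intro values _
  exact choose_eq values
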